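-- pv_equiv track=rewrite | github.com/levanphuoc-dev/CS112.L21 | week_1/SEAWEED/SEAWEED.py | solve
-- ===== SOURCE A (Python) =====
-- def solve(n,k):
--     fibo = [0,1]
--     sum = 1
--     for i in range(0,2*k):
--         fibo.append(fibo[1]+fibo[0])
--         fibo.pop(0)
--         if i % 2 == 0:
--             sum+=fibo[1]
--     return sum*n%(10**9+7)
-- ===== SOURCE B (Python) =====
-- M = 10**9 + 7
--
-- def _fd(m):
--     # returns (F(m) % M, F(m+1) % M) by fast doubling
--     if m == 0:
--         return (0, 1)
--     a, b = _fd(m >> 1)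
--     c = a * (2 * b - a) % M
--     d = (a * a + b * b) % M
--     if m & 1:
--         return (d, (c + d) % M)
--     return (c, d)
--
-- def solve(n, k):
--     # 1 + sum_{j=1..k} F(2j) = F(2k+1)
--     f = 1 if k <= 0 else _fd(2 * k + 1)[0]
--     return f * n % M
-- ===== Notes on version B (the rewrite author's own statement) =====
-- stated objective: faster
-- what changed: Replaced the O(k) loop that generates 2k Fibonacci numbers and sums every other one with fast-doubling computation of F(2k+1) mod 1e9+7, using the identity 1 + sum_{j=1..k} F(2j) = F(2k+1).
import Mathlib
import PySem

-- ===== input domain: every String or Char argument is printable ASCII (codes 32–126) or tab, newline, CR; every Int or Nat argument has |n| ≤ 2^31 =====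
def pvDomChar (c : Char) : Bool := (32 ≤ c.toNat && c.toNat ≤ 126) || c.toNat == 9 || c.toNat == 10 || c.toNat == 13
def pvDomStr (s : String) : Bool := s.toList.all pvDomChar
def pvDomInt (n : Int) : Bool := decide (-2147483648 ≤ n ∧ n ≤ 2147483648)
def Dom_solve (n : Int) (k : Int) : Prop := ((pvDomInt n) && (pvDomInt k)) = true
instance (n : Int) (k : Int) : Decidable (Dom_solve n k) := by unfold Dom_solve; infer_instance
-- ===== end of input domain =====

-- B replaces A's O(k) Fibonacci-generating loop by fast doubling of F(2k+1) mod 1e9+7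
-- (identity: 1 + Σ_{j=1..k} F(2j) = F(2k+1)); objective: faster (asymptotic, O(log k)).

-- ===== PORT A =====
-- state = (fibo, sum); the list always has ≥ 2 elements, so the `.getD` defaults
-- (guards that make the same computation total) are never taken.
def solveStep (st : List Int × Int) (i : Int) : List Int × Int :=
  let fibo₁ := st.1 ++ [(PySem.List.pyGet? st.1 1).getD 0 + (PySem.List.pyGet? st.1 0).getD 0]
  let fibo₂ := ((PySem.List.pop? fibo₁ 0).map (·.2)).getD fibo₁
  let s := if PySem.Int.mod i 2 = 0 then st.2 + (PySem.List.pyGet? fibo₂ 1).getD 0 else st.2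
  (fibo₂, s)

def solve (n : Int) (k : Int) : Int :=
  let st := (PySem.List.pyRange 0 (2 * k) 1).foldl solveStep ([0, 1], 1)
  PySem.Int.mod (st.2 * n) (10 ^ 9 + 7)

-- ===== PORT B =====
def pvM : Int := 10 ^ 9 + 7

-- fast doubling: fd m = (F(m) % M, F(m+1) % M)
def fd : Nat → Int × Int
  | 0 => (0, 1)
  | m + 1 =>
    let p := fd ((m + 1) / 2)
    let a := p.1
    let b := p.2
    let c := PySem.Int.mod (a * (2 * b - a)) pvM
    let d := PySem.Int.mod (a * a + b * b) pvM
    if (m + 1) % 2 = 1 then (d, PySem.Int.mod (c + d) pvM) else (c, d)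
  decreasing_by exact Nat.div_lt_self (by omega) (by omega)

def solve_alt (n : Int) (k : Int) : Int :=
  let f : Int := if k ≤ 0 then 1 else (fd (2 * k + 1).toNat).1
  PySem.Int.mod (f * n) pvM

-- ===== PRECONDITION & SPEC =====
def Spec_solve (n : Int) (k : Int) (out : Int) : Prop := out = solve_alt n k
instance (n : Int) (k : Int) (out : Int) : Decidable (Spec_solve n k out) := by unfold Spec_solve; infer_instance

-- ===== CLAIM (what is proved, stated in full; the proofs are below) =====
def Claim_equal_solve : Prop := ∀ (n : Int) (k : Int), Dom_solve n k → Spec_solve n k (solve n k)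

-- ===== LEMMAS AND PROOFS =====

theorem pvM_pos : (0 : Int) < pvM := by decide

-- PySem.Int.mod by pvM is Int.emod (positive modulus)
theorem pvmod_eq (a : Int) : PySem.Int.mod a pvM = a % pvM :=
  PySem.Int.mod_eq_emod_of_pos pvM_pos

theorem emod_modeq (x : Int) : x % pvM ≡ x [ZMOD pvM] :=
  Int.emod_emod_of_dvd x dvd_rfl

-- fast doubling correctness
theorem fd_eq (m : Nat) : fd m = ((Nat.fib m : Int) % pvM, (Nat.fib (m + 1) : Int) % pvM) := by
  induction m using fd.induct with
  | case1 => simp [fd]; decide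
  | case2 m hodd ih =>
    rw [fd, ih]
    rw [if_pos hodd]
    dsimp only
    simp only [Nat.succ_eq_add_one]
    set t := (m + 1) / 2 with ht
    have ha := emod_modeq (Nat.fib t : Int)
    have hb := emod_modeq (Nat.fib (t + 1) : Int)
    have hc : ((Nat.fib t : Int) % pvM) * (2 * ((Nat.fib (t+1) : Int) % pvM) - (Nat.fib t : Int) % pvM)
        ≡ (Nat.fib t : Int) * (2 * (Nat.fib (t+1) : Int) - (Nat.fib t : Int)) [ZMOD pvM] :=
      ha.mul ((hb.mul_left 2).sub ha)
    have hd : ((Nat.fib t : Int) % pvM) * ((Nat.fib t : Int) % pvM) + ((Nat.fib (t+1) : Int) % pvM) * ((Nat.fib (t+1) : Int) % pvM)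
        ≡ (Nat.fib t : Int) * (Nat.fib t : Int) + (Nat.fib (t+1) : Int) * (Nat.fib (t+1) : Int) [ZMOD pvM] :=
      (ha.mul ha).add (hb.mul hb)
    have hle : Nat.fib t ≤ 2 * Nat.fib (t + 1) :=
      le_trans (Nat.fib_le_fib_succ) (by omega)
    have h2t : (Nat.fib (2 * t) : Int) = (Nat.fib t : Int) * (2 * (Nat.fib (t+1) : Int) - (Nat.fib t : Int)) := by
      rw [Nat.fib_two_mul]; push_cast [hle]; ring
    have h2t1 : (Nat.fib (2 * t + 1) : Int) = (Nat.fib t : Int) * (Nat.fib t : Int) + (Nat.fib (t+1) : Int) * (Nat.fib (t+1) : Int) := by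
      rw [Nat.fib_two_mul_add_one]; push_cast; ring
    have hm1 : m + 1 = 2 * t + 1 := by omega
    have hm2 : m + 1 + 1 = 2 * t + 2 := by omega
    rw [Prod.mk.injEq]
    constructor
    · rw [pvmod_eq, hm1, h2t1]; exact hd
    · rw [pvmod_eq, pvmod_eq, pvmod_eq, hm2]
      have hfib : (Nat.fib (2 * t + 2) : Int) = (Nat.fib (2 * t) : Int) + (Nat.fib (2 * t + 1) : Int) := by
        have := Nat.fib_add_two (n := 2 * t); push_cast [this]; ring
      rw [hfib]
      calc ((((Nat.fib t : Int) % pvM) * (2 * ((Nat.fib (t+1) : Int) % pvM) - (Nat.fib t : Int) % pvM)) % pvM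
            + (((Nat.fib t : Int) % pvM) * ((Nat.fib t : Int) % pvM) + ((Nat.fib (t+1) : Int) % pvM) * ((Nat.fib (t+1) : Int) % pvM)) % pvM) % pvM
          = ((Nat.fib (2 * t) : Int) % pvM + (Nat.fib (2 * t + 1) : Int) % pvM) % pvM := by
            congr 1
            · congr 1
              · rw [h2t]; exact hc
              · rw [h2t1]; exact hd
        _ = ((Nat.fib (2 * t) : Int) + (Nat.fib (2 * t + 1) : Int)) % pvM :=
            ((emod_modeq _).add (emod_modeq _))
  | case3 m heven ih =>
    rw [fd, ih]
    rw [if_neg heven]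
    dsimp only
    simp only [Nat.succ_eq_add_one]
    set t := (m + 1) / 2 with ht
    have ha := emod_modeq (Nat.fib t : Int)
    have hb := emod_modeq (Nat.fib (t + 1) : Int)
    have hc : ((Nat.fib t : Int) % pvM) * (2 * ((Nat.fib (t+1) : Int) % pvM) - (Nat.fib t : Int) % pvM)
        ≡ (Nat.fib t : Int) * (2 * (Nat.fib (t+1) : Int) - (Nat.fib t : Int)) [ZMOD pvM] :=
      ha.mul ((hb.mul_left 2).sub ha)
    have hd : ((Nat.fib t : Int) % pvM) * ((Nat.fib t : Int) % pvM) + ((Nat.fib (t+1) : Int) % pvM) * ((Nat.fib (t+1) : Int) % pvM)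
        ≡ (Nat.fib t : Int) * (Nat.fib t : Int) + (Nat.fib (t+1) : Int) * (Nat.fib (t+1) : Int) [ZMOD pvM] :=
      (ha.mul ha).add (hb.mul hb)
    have hle : Nat.fib t ≤ 2 * Nat.fib (t + 1) :=
      le_trans (Nat.fib_le_fib_succ) (by omega)
    have h2t : (Nat.fib (2 * t) : Int) = (Nat.fib t : Int) * (2 * (Nat.fib (t+1) : Int) - (Nat.fib t : Int)) := by
      rw [Nat.fib_two_mul]; push_cast [hle]; ring
    have h2t1 : (Nat.fib (2 * t + 1) : Int) = (Nat.fib t : Int) * (Nat.fib t : Int) + (Nat.fib (t+1) : Int) * (Nat.fib (t+1) : Int) := by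
      rw [Nat.fib_two_mul_add_one]; push_cast; ring
    have hm1 : m + 1 = 2 * t := by omega
    rw [Prod.mk.injEq]
    constructor
    · rw [pvmod_eq, hm1, h2t]; exact hc
    · rw [pvmod_eq, hm1, h2t1]; exact hd

-- one loop step of A on a 2-element state
theorem step_eval (a b s i : Int) :
    solveStep ([a, b], s) i = ([b, b + a], if PySem.Int.mod i 2 = 0 then s + (b + a) else s) := by
  simp [solveStep, PySem.List.pyGet?, PySem.List.pyIdx?, PySem.List.pop?]

-- A's loop invariant: after 2m iterations the state is ([F(2m), F(2m+1)], F(2m+1))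
theorem loopA (m : Nat) :
    (PySem.List.pyRange 0 (2 * (m : Int)) 1).foldl solveStep ([0, 1], 1)
      = ([(Nat.fib (2 * m) : Int), (Nat.fib (2 * m + 1) : Int)], (Nat.fib (2 * m + 1) : Int)) := by
  induction m with
  | zero => simp
  | succ m ih =>
    have h1 : (2 * ((m : Int) + 1)) = (2 * (m : Int) + 1) + 1 := by ring
    have hsplit : PySem.List.pyRange 0 (2 * ((m : Int) + 1)) 1
        = PySem.List.pyRange 0 (2 * (m : Int)) 1 ++ [2 * (m : Int)] ++ [2 * (m : Int) + 1] := by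
      rw [h1, PySem.List.pyRange_one_succ_right (by omega), PySem.List.pyRange_one_succ_right (by omega)]
    push_cast
    rw [hsplit, List.foldl_append, List.foldl_append, ih]
    simp only [List.foldl_cons, List.foldl_nil, step_eval]
    have heven : PySem.Int.mod (2 * (m : Int)) 2 = 0 := by
      rw [PySem.Int.mod_eq_emod_of_pos (by decide : (0:Int) < 2)]; omega
    have hodd : ¬ PySem.Int.mod (2 * (m : Int) + 1) 2 = 0 := by
      rw [PySem.Int.mod_eq_emod_of_pos (by decide : (0:Int) < 2)]; omega
    rw [if_pos heven, if_neg hodd]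
    have hf3 : (Nat.fib (2 * m + 3) : Int) = (Nat.fib (2 * m + 1) : Int) + (Nat.fib (2 * m + 2) : Int) := by
      have := Nat.fib_add_two (n := 2 * m + 1); push_cast [this]; ring
    have hf2 : (Nat.fib (2 * m + 2) : Int) = (Nat.fib (2 * m) : Int) + (Nat.fib (2 * m + 1) : Int) := by
      have := Nat.fib_add_two (n := 2 * m); push_cast [this]; ring
    rw [show 2 * (m + 1) = 2 * m + 2 from by omega, show 2 * m + 2 + 1 = 2 * m + 3 from by omega, hf3, hf2]
    simp only [Prod.mk.injEq, List.cons.injEq, and_true]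
    refine ⟨⟨by ring, by ring⟩, by ring⟩

-- ===== VERDICT (by name: the statement is the Claim_ definition above) =====
theorem solve_spec : Claim_equal_solve := by
  intro n k _
  unfold Spec_solve solve solve_alt
  by_cases hk : k ≤ 0
  · rw [if_pos hk]
    have hnil : PySem.List.pyRange 0 (2 * k) 1 = [] := PySem.List.pyRange_one_eq_nil (by omega)
    rw [hnil]
    rfl
  · rw [if_neg hk]
    have hm1 : (2 * k + 1).toNat = 2 * k.toNat + 1 := by omega
    have hm : (2 * k) = 2 * ((k.toNat : Int)) := by omega
    rw [hm1, fd_eq, hm, loopA]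
    show PySem.Int.mod ((Nat.fib (2 * k.toNat + 1) : Int) * n) pvM
        = PySem.Int.mod (((Nat.fib (2 * k.toNat + 1) : Int)) % pvM * n) pvM
    rw [pvmod_eq, pvmod_eq]
    exact ((emod_modeq _).mul_right n).symm
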